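-- pv_equiv track=rewrite | github.com/Li-Hongmin/ID3 | id3/experiments/analysis/core/diversity_metrics.py | longest_repetition_streak
-- ===== SOURCE A (Python) =====
-- from typing import List, Dict, Tuple, Optional
--
-- def longest_repetition_streak(sequences: List[str]) -> Tuple[str, int, int]:
--     """
--     Find the longest consecutive repetition of the same sequence.
--
--     Args:
--         sequences: List of sequences
--
--     Returns:
--         Tuple of (sequence, streak_length, start_position)
--     """
--     if not sequences:
--         return ("", 0, 0)
--
--     max_streak = 1
--     max_seq = sequences[0] if sequences else ""
--     max_pos = 0
--
--     current_streak = 1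
--     current_seq = sequences[0] if sequences else ""
--     current_pos = 0
--
--     for i in range(1, len(sequences)):
--         if sequences[i] == sequences[i-1]:
--             current_streak += 1
--         else:
--             if current_streak > max_streak:
--                 max_streak = current_streak
--                 max_seq = current_seq
--                 max_pos = current_pos
--
--             current_streak = 1
--             current_seq = sequences[i]
--             current_pos = i
--
--     # Check final streak
--     if current_streak > max_streak:
--         max_streak = current_streak
--         max_seq = current_seq
--         max_pos = current_pos
--
--     return (max_seq, max_streak, max_pos)
-- ===== SOURCE B (Python) =====
-- from typing import List, Tuple
--
--
-- def longest_repetition_streak(sequences: List[str]) -> Tuple[str, int, int]: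
--     """Two staged passes (groupby-style): first materialize the list of
--     maximal runs as (sequence, length, start) triples by detecting run
--     boundaries, then select the first longest run with a separate max
--     pass (strict key comparison, so the earliest longest run wins)."""
--     if not sequences:
--         return ("", 0, 0)
--     runs = []
--     start = 0
--     for i in range(1, len(sequences) + 1):
--         if i == len(sequences) or sequences[i] != sequences[start]:
--             runs.append((sequences[start], i - start, start))
--             start = i
--     return max(runs, key=lambda r: r[1])
-- ===== Notes on version B (the rewrite author's own statement) =====
-- stated objective: alternative
-- what changed: B replaces A's online streak counter with running best and trailing final check by two staged passes: a groupby-style pass that materializes the full list of maximal runs as (sequence, length, start) triples, followed by a separate max-by-length selection over that list.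
import Mathlib
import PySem

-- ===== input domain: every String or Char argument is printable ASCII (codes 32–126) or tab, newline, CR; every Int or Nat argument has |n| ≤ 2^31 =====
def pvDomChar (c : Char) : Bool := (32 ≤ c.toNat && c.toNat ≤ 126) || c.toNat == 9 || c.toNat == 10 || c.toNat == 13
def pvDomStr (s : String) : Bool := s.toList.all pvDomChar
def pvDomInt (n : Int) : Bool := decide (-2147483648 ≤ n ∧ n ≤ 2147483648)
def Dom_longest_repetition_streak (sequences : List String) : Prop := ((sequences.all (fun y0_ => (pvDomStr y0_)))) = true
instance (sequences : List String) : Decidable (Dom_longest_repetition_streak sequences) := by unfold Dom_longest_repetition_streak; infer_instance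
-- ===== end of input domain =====

-- B replaces A's online streak counter (with running best and trailing final check) by two
-- staged passes: materialize all maximal runs, then select the first longest; same O(n) cost (alternative).


-- ===== PORT A =====
-- A's for-loop over i in range(1, n) reads sequences[i] and sequences[i-1]; it is
-- transcribed as a structural recursion over the tail carrying prev = sequences[i-1]
-- (exact: the loop touches the list only through those two adjacent elements),
-- with mst = (max_streak, max_seq, max_pos) and cst = (current_streak, current_seq, current_pos).
def loopA (rest : List String) (prev : String) (i : Int)
    (mst cst : Int × String × Int) : (Int × String × Int) × (Int × String × Int) :=
  match rest with
  | [] => (mst, cst)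
  | x :: xs =>
    if x == prev then
      loopA xs x (i + 1) mst (cst.1 + 1, cst.2.1, cst.2.2)
    else
      let mst' := if cst.1 > mst.1 then cst else mst
      loopA xs x (i + 1) mst' (1, x, i)

def longest_repetition_streak (sequences : List String) : String × Int × Int :=
  match sequences with
  | [] => ("", 0, 0)
  | s0 :: rest =>
    let r := loopA rest s0 1 (1, s0, 0) (1, s0, 0)
    -- check final streak
    let m := if r.2.1 > r.1.1 then r.2 else r.1
    (m.2.1, m.1, m.2.2)

-- ===== PORT B =====
-- B's first pass scans i = 1 .. n comparing sequences[i] with sequences[start], the head of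
-- the current run, and appends a completed run at each boundary (and at i = n); it is
-- transcribed as a structural recursion over the tail carrying head = sequences[start]
-- (exact: the loop touches the list only through sequences[i] and the current run's head),
-- accumulating the runs list.  The second pass is Python's max(runs, key=length):
-- fold of the strict-greater step over the tail starting from the first run.
def buildRuns (rest : List String) (head : String) (start i : Int)
    (runs : List (String × Int × Int)) : List (String × Int × Int) :=
  match rest with
  | [] => runs ++ [(head, i - start, start)]
  | x :: xs =>
    if x == head then buildRuns xs head start (i + 1) runs
    else buildRuns xs x i (i + 1) (runs ++ [(head, i - start, start)])

def stepB (b r : String × Int × Int) : String × Int × Int :=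
  if r.2.1 > b.2.1 then r else b

def longest_repetition_streak_alt (sequences : List String) : String × Int × Int :=
  match sequences with
  | [] => ("", 0, 0)
  | s0 :: rest =>
    match buildRuns rest s0 0 1 [] with
    | [] => ("", 0, 0)   -- unreachable: buildRuns always returns a nonempty list
    | r :: rs => rs.foldl stepB r

-- ===== PRECONDITION & SPEC =====
def Spec_longest_repetition_streak (sequences : List String) (out : String × Int × Int) : Prop := out = longest_repetition_streak_alt sequences
instance (sequences : List String) (out : String × Int × Int) : Decidable (Spec_longest_repetition_streak sequences out) := by unfold Spec_longest_repetition_streak; infer_instance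

-- ===== CLAIM (what is proved, stated in full; the proofs are below) =====
def Claim_equal_longest_repetition_streak : Prop := ∀ (sequences : List String), Dom_longest_repetition_streak sequences → Spec_longest_repetition_streak sequences (longest_repetition_streak sequences)

-- ===== LEMMAS AND PROOFS =====

-- buildRuns only ever appends to its accumulator.
lemma buildRuns_acc : ∀ (rest : List String) (s : String) (st i : Int) (runs : List (String × Int × Int)),
    buildRuns rest s st i runs = runs ++ buildRuns rest s st i [] := by
  intro rest
  induction rest with
  | nil => intro s st i runs; simp [buildRuns]
  | cons x xs ih =>
    intro s st i runs
    by_cases h : x == s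
    · simp only [buildRuns, h, if_true]; exact ih _ _ _ _
    · simp only [buildRuns, h, Bool.false_eq_true, if_false]
      simp only [List.nil_append]
      rw [ih _ _ _ (runs ++ [(s, i - st, st)]), ih _ _ _ ([(s, i - st, st)]), List.append_assoc]

-- The first run produced by buildRuns has key s, start st, and length ≥ i - st.
lemma buildRuns_head : ∀ (rest : List String) (s : String) (st i : Int),
    ∃ (k : Int) (rs : List (String × Int × Int)),
      buildRuns rest s st i [] = (s, k, st) :: rs ∧ i - st ≤ k := by
  intro rest
  induction rest with
  | nil => intro s st i; exact ⟨i - st, [], by simp [buildRuns], le_refl _⟩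
  | cons x xs ih =>
    intro s st i
    by_cases h : x == s
    · obtain ⟨k, rs, he, hk⟩ := ih s st (i + 1)
      exact ⟨k, rs, by simp only [buildRuns, h, if_true]; exact he, by omega⟩
    · refine ⟨i - st, buildRuns xs x i (i + 1) [], ?_, le_refl _⟩
      simp only [buildRuns, h, Bool.false_eq_true, if_false]
      rw [buildRuns_acc]; simp

-- A's loop (with the trailing final-streak check) started mid-run — current run key s,
-- count cl, start p, index i = p + cl, best (ml, ms, mp) — equals B's max-fold over the
-- runs that buildRuns produces from that point, seeded with the same best triple.
lemma loopA_eq_fold : ∀ (rest : List String) (s : String) (ml cl p : Int) (ms : String) (mp : Int),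
    (let r := loopA rest s (p + cl) (ml, ms, mp) (cl, s, p);
     let m := if r.2.1 > r.1.1 then r.2 else r.1;
     (m.2.1, m.1, m.2.2))
    = List.foldl stepB (ms, ml, mp) (buildRuns rest s p (p + cl) []) := by
  intro rest
  induction rest with
  | nil =>
    intro s ml cl p ms mp
    simp only [loopA, buildRuns, List.nil_append, List.foldl_cons, List.foldl_nil, stepB]
    have : p + cl - p = cl := by ring
    rw [this]
    split <;> simp_all
  | cons x xs ih =>
    intro s ml cl p ms mp
    by_cases h : x == s
    · have hx : x = s := eq_of_beq h
      subst hx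
      simp only [loopA, h, if_true, buildRuns]
      have harith : p + cl + 1 = p + (cl + 1) := by ring
      rw [harith]
      simpa using ih x ml (cl + 1) p ms mp
    · simp only [loopA, h, Bool.false_eq_true, if_false, buildRuns]
      rw [buildRuns_acc xs x (p + cl) (p + cl + 1)]
      have harith : p + cl - p = cl := by ring
      rw [harith]
      simp only [List.nil_append, List.cons_append, List.foldl_cons]
      by_cases hc : cl > ml
      · have hstep : stepB (ms, ml, mp) (s, cl, p) = (s, cl, p) := by simp [stepB, hc]
        rw [hstep]
        simp only [hc, if_true]
        simpa using ih x cl 1 (p + cl) s p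
      · have hstep : stepB (ms, ml, mp) (s, cl, p) = (ms, ml, mp) := by simp [stepB, hc]
        rw [hstep]
        simp only [hc, if_false]
        simpa using ih x ml 1 (p + cl) ms mp

-- ===== VERDICT (by name: the statement is the Claim_ definition above) =====
theorem longest_repetition_streak_spec : Claim_equal_longest_repetition_streak := by
  intro sequences _
  unfold Spec_longest_repetition_streak longest_repetition_streak longest_repetition_streak_alt
  cases sequences with
  | nil => rfl
  | cons x xs =>
    have h := loopA_eq_fold xs x 1 1 0 x 0
    simp only [zero_add] at h
    show (let r := loopA xs x 1 (1, x, 0) (1, x, 0);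
          let m := if r.2.1 > r.1.1 then r.2 else r.1;
          (m.2.1, m.1, m.2.2))
        = (match buildRuns xs x 0 1 [] with
           | [] => ("", 0, 0)
           | r :: rs => rs.foldl stepB r)
    obtain ⟨k, rs, he, hk⟩ := buildRuns_head xs x 0 1
    rw [h, he]
    simp only [List.foldl_cons]
    -- the seed (x, 1, 0) is absorbed by the first run (x, k, 0), k ≥ 1
    have : stepB (x, 1, 0) (x, k, 0) = (x, k, 0) := by
      unfold stepB
      rcases eq_or_lt_of_le hk with h1 | h1
      · simp [← h1]
      · rw [if_pos (by simpa using h1)]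
    rw [this]
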